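-- pv_equiv track=rewrite | github.com/Meeskees/schoppen_zevenen | ai_1a.py | value_card
-- ===== SOURCE A (Python) =====
-- def value_pos_sub(hand,board,card_color,start_nr,end_nr): #start_nr <= end_nr
--     multiple = [12,10,8,6,4,2,1,6,10,14,18,22,26,30]
--     value_ind =0
--     for j in range(start_nr,end_nr):
--         if board[(card_color-1)*13+j] == 0:
--             value_ind+= multiple[j-1]
--             if (card_color-1)*13+j+1 not in hand:
--                 value_ind+= multiple[j-1]
--     return(value_ind)
--
-- def value_neg_sub(hand,board,card_color,start_nr,end_nr): #start_nr>= end_nr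
--     return(value_pos_sub(hand,board,card_color,end_nr,start_nr))
--
-- def value_card(hand,board,aces,card,potaces):
--     value=0
--     res_ind =0
--     single=[11,10,9,8,6,4,1,2,3,5,7,12,13,14]
--     cardlist= [int(card/13-1),((card-1)%13)+1]
--     handlist = []
--     subsequent_cards=[]
--     for handcard in hand:
--         handlist.append([int(handcard/13-1),(handcard-1)%13+1])
--
--     if cardlist[1] >= 7 or (cardlist[1] ==0 and aces !=1 and potaces ==2):
--         if aces !=1:
--             for handcardlist in handlist:
--                 if handcardlist == [cardlist[0],1]:
--                     handcardlist = [cardlist[0],14]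
--         for i in range(cardlist[1]+1,14):
--             if [cardlist[0],i] in handlist:
--                 subsequent_cards.append(i)
--         if subsequent_cards == []:
--             value= single[cardlist[1]-1]
--         else:
--             n= max(subsequent_cards)+1
--             for i in range(cardlist[1],n):
--                 value += value_pos_sub(hand,board,cardlist[0],cardlist[1],i)
--
--     if (cardlist[1] < 7 and cardlist[1] > 1) or (cardlist[1] ==0 and aces !=2 and potaces ==1):
--         if aces ==2:
--             for handcardlist in handlist:
--                 if handcardlist == [cardlist[0],1]:
--                     handcardlist = [cardlist[0],14]
--         for i in range(1,cardlist[1]):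
--             if [cardlist[0],i] in handlist:
--                 subsequent_cards.append(i)
--         if subsequent_cards == []:
--             value= single[cardlist[1]-1]
--         else:
--             n= min(subsequent_cards)
--             for i in range(cardlist[1],n):
--                 value += value_neg_sub(hand,board,cardlist[0],cardlist[1],i)
--
--     if cardlist[1]==1 and aces ==0:
--         for i in range(1,5):
--             if cardlist[0] != i:
--                 for i in range(1,8):
--                     res_ind -= value_neg_sub(hand,board,cardlist[0],1,i)
--                 for i in range(7,14):
--                     res_ind += value_pos_sub(hand,board,cardlist[0],i,14)
--         if potaces ==1:
--             value+= res_ind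
--         if potaces ==2:
--             value-= res_ind
--     return value
-- ===== SOURCE B (Python) =====
-- def value_card(hand, board, aces, card, potaces):
--     multiple = [12, 10, 8, 6, 4, 2, 1, 6, 10, 14, 18, 22, 26, 30]
--     single = [11, 10, 9, 8, 6, 4, 1, 2, 3, 5, 7, 12, 13, 14]
--     color = int(card / 13 - 1)
--     rank = (card - 1) % 13 + 1
--     ranks_in_color = {(h - 1) % 13 + 1 for h in hand if int(h / 13 - 1) == color}
--
--     def term(j):
--         if board[(color - 1) * 13 + j] != 0:
--             return 0
--         t = multiple[j - 1]
--         if (color - 1) * 13 + j + 1 not in hand: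
--             t += multiple[j - 1]
--         return t
--
--     if rank >= 7:
--         higher = [i for i in range(rank + 1, 14) if i in ranks_in_color]
--         if not higher:
--             return single[rank - 1]
--         value = 0
--         partial = 0
--         for i in range(rank + 1, max(higher) + 1):
--             partial += term(i - 1)
--             value += partial
--         return value
--     if rank > 1:
--         if any(i in ranks_in_color for i in range(1, rank)):
--             return 0  # A's inner range(rank, min(...)) is empty, so it adds nothing
--         return single[rank - 1]
--     if aces == 0:  # rank == 1
--         k = sum(1 for i in range(1, 5) if color != i)
--         partial = 0
--         res = 0
--         for j in range(13, 6, -1):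
--             partial += term(j)
--             res += partial
--         res *= k
--         if potaces == 1:
--             return res
--         if potaces == 2:
--             return -res
--     return 0
-- ===== Notes on version B (the rewrite author's own statement) =====
-- stated objective: faster
-- what changed: Replaces A's repeated triangular re-summation (value_pos_sub re-summed from scratch for every i) with a single forward running-accumulator pass, precomputes the set of same-color ranks in hand instead of rescanning the [color,rank] pair list, and drops A's two no-op handcardlist reassignment loops and its provably empty range(rank, min(...)) loop.
import Mathlib
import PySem

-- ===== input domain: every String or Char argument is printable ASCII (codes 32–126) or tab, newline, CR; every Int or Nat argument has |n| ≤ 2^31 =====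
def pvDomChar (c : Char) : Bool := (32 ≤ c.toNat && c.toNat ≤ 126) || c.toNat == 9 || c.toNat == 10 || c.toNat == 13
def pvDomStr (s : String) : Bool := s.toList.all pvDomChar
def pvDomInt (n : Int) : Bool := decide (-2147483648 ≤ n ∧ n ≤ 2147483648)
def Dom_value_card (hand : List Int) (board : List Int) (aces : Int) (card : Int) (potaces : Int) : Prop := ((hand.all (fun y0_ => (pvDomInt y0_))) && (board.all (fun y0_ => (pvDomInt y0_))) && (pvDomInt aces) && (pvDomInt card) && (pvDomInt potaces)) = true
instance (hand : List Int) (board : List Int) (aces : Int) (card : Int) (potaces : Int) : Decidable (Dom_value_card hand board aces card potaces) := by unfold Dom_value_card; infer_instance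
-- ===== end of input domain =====

-- B replaces A's repeated triangular partial sums (value_pos_sub re-summed for every i) by one
-- running-accumulator pass, drops A's two no-op handcardlist loops and its provably empty
-- range(rank, min) loop; objective: faster by a constant/asymptotic mechanism on the main branch.

-- ===== PORT A =====
-- int(card/13 - 1) equals trunc((card-13)/13); exact for |card| ≤ 2^31 (< 2^53, float-exact).
def pvMultiple : List Int := [12, 10, 8, 6, 4, 2, 1, 6, 10, 14, 18, 22, 26, 30]
def pvSingle : List Int := [11, 10, 9, 8, 6, 4, 1, 2, 3, 5, 7, 12, 13, 14]

def value_pos_sub (hand : List Int) (board : List Int) (card_color : Int) (start_nr : Int) (end_nr : Int) : Int :=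
  (PySem.List.pyRange start_nr end_nr 1).foldl (fun value_ind j =>
    if PySem.List.pyGetD board ((card_color - 1) * 13 + j) 0 == 0 then
      let value_ind := value_ind + PySem.List.pyGetD pvMultiple (j - 1) 0
      if !(hand.contains ((card_color - 1) * 13 + j + 1)) then
        value_ind + PySem.List.pyGetD pvMultiple (j - 1) 0
      else value_ind
    else value_ind) 0

def value_neg_sub (hand : List Int) (board : List Int) (card_color : Int) (start_nr : Int) (end_nr : Int) : Int :=
  value_pos_sub hand board card_color end_nr start_nr

def value_card (hand : List Int) (board : List Int) (aces : Int) (card : Int) (potaces : Int) : Int :=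
  let value : Int := 0
  let res_ind : Int := 0
  let c0 : Int := PySem.Int.truncdiv (card - 13) 13
  let r : Int := PySem.Int.mod (card - 1) 13 + 1
  let handlist : List (Int × Int) :=
    hand.foldl (fun acc h => acc ++ [(PySem.Int.truncdiv (h - 13) 13, PySem.Int.mod (h - 1) 13 + 1)]) []
  let subs : List Int := []
  -- Python's two 'for handcardlist in handlist: handcardlist = [...]' loops only rebind the
  -- loop variable and change nothing: omitted (exact).
  -- (value, subsequent_cards) after the first branch, carried as a pair vs:
  let vs : Int × List Int :=
    if r ≥ 7 ∨ (r = 0 ∧ aces ≠ 1 ∧ potaces = 2) then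
      let subs := (PySem.List.pyRange (r + 1) 14 1).foldl
        (fun acc i => if handlist.contains (c0, i) then acc ++ [i] else acc) subs
      if subs = [] then (PySem.List.pyGetD pvSingle (r - 1) 0, subs)
      else
        let n := (PySem.List.max? subs (fun x => x)).getD 0 + 1
        ((PySem.List.pyRange r n 1).foldl (fun v i => v + value_pos_sub hand board c0 r i) value, subs)
    else (value, subs)
  let value :=
    if (r < 7 ∧ r > 1) ∨ (r = 0 ∧ aces ≠ 2 ∧ potaces = 1) then
      let subs := (PySem.List.pyRange 1 r 1).foldl
        (fun acc i => if handlist.contains (c0, i) then acc ++ [i] else acc) vs.2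
      if subs = [] then PySem.List.pyGetD pvSingle (r - 1) 0
      else
        let n := (PySem.List.min? subs (fun x => x)).getD 0
        (PySem.List.pyRange r n 1).foldl (fun v i => v + value_neg_sub hand board c0 r i) vs.1
    else vs.1
  if r = 1 ∧ aces = 0 then
    let res_ind := (PySem.List.pyRange 1 5 1).foldl (fun res i =>
      if c0 ≠ i then
        let res := (PySem.List.pyRange 1 8 1).foldl (fun res j => res - value_neg_sub hand board c0 1 j) res
        (PySem.List.pyRange 7 14 1).foldl (fun res j => res + value_pos_sub hand board c0 j 14) res
      else res) res_ind
    let value := if potaces = 1 then value + res_ind else value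
    if potaces = 2 then value - res_ind else value
  else value

-- ===== PORT B =====
def pvTerm (hand : List Int) (board : List Int) (color : Int) (j : Int) : Int :=
  if PySem.List.pyGetD board ((color - 1) * 13 + j) 0 != 0 then 0
  else
    let t := PySem.List.pyGetD pvMultiple (j - 1) 0
    if !(hand.contains ((color - 1) * 13 + j + 1)) then t + PySem.List.pyGetD pvMultiple (j - 1) 0
    else t

def value_card_alt (hand : List Int) (board : List Int) (aces : Int) (card : Int) (potaces : Int) : Int :=
  let color : Int := PySem.Int.truncdiv (card - 13) 13
  let rank : Int := PySem.Int.mod (card - 1) 13 + 1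
  let ranksInColor : PySem.Set Int := PySem.Set.ofList
    ((hand.filter (fun h => PySem.Int.truncdiv (h - 13) 13 == color)).map
      (fun h => PySem.Int.mod (h - 1) 13 + 1))
  if rank ≥ 7 then
    let higher := (PySem.List.pyRange (rank + 1) 14 1).filter (fun i => PySem.Set.contains ranksInColor i)
    if higher = [] then PySem.List.pyGetD pvSingle (rank - 1) 0
    else
      let m := (PySem.List.max? higher (fun x => x)).getD 0
      ((PySem.List.pyRange (rank + 1) (m + 1) 1).foldl
        (fun (s : Int × Int) i =>
          (s.1 + pvTerm hand board color (i - 1), s.2 + (s.1 + pvTerm hand board color (i - 1))))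
        ((0 : Int), (0 : Int))).2
  else if rank > 1 then
    if (PySem.List.pyRange 1 rank 1).any (fun i => PySem.Set.contains ranksInColor i) then 0
    else PySem.List.pyGetD pvSingle (rank - 1) 0
  else if aces = 0 then
    let k : Int := ((PySem.List.pyRange 1 5 1).filter (fun i => color ≠ i)).length
    let res := ((PySem.List.pyRange 13 6 (-1)).foldl
      (fun (s : Int × Int) j =>
        (s.1 + pvTerm hand board color j, s.2 + (s.1 + pvTerm hand board color j)))
      ((0 : Int), (0 : Int))).2 * k
    if potaces = 1 then res
    else if potaces = 2 then -res
    else 0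
  else 0

-- ===== PRECONDITION & SPEC =====
-- Pre_ excludes exactly the inputs on which A raises IndexError: an out-of-range board index
-- among the positions A actually reads (j in [rank, maxHigher-1] when rank ≥ 7 and a higher
-- same-color card is in hand; j in [7,13] in the ace branch rank = 1 ∧ aces = 0).
def Pre_value_card (hand : List Int) (board : List Int) (aces : Int) (card : Int) (potaces : Int) : Prop :=
  (7 ≤ PySem.Int.mod (card - 1) 13 + 1 →
    ∀ j ∈ PySem.List.pyRange (PySem.Int.mod (card - 1) 13 + 1) 13 1,
      (∃ h ∈ hand, PySem.Int.truncdiv (h - 13) 13 = PySem.Int.truncdiv (card - 13) 13 ∧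
        j < PySem.Int.mod (h - 1) 13 + 1) →
      PySem.Raise.InRange board.length ((PySem.Int.truncdiv (card - 13) 13 - 1) * 13 + j))
  ∧ (PySem.Int.mod (card - 1) 13 + 1 = 1 ∧ aces = 0 →
    ∀ j ∈ PySem.List.pyRange 7 14 1,
      PySem.Raise.InRange board.length ((PySem.Int.truncdiv (card - 13) 13 - 1) * 13 + j))
instance (hand : List Int) (board : List Int) (aces : Int) (card : Int) (potaces : Int) : Decidable (Pre_value_card hand board aces card potaces) := by unfold Pre_value_card; infer_instance

def pvWitness_value_card : List Int × List Int × Int × Int × Int := ([], [], 1, 7, 0)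

def Spec_value_card (hand : List Int) (board : List Int) (aces : Int) (card : Int) (potaces : Int) (out : Int) : Prop := out = value_card_alt hand board aces card potaces
instance (hand : List Int) (board : List Int) (aces : Int) (card : Int) (potaces : Int) (out : Int) : Decidable (Spec_value_card hand board aces card potaces out) := by unfold Spec_value_card; infer_instance

-- ===== CLAIM (what is proved, stated in full; the proofs are below) =====
def Claim_equal_value_card : Prop := ∀ (hand : List Int) (board : List Int) (aces : Int) (card : Int) (potaces : Int), Dom_value_card hand board aces card potaces → Pre_value_card hand board aces card potaces → Spec_value_card hand board aces card potaces (value_card hand board aces card potaces)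

-- ===== LEMMAS AND PROOFS =====

-- A's inner scan as a plain sum of per-position terms.
theorem pos_sub_sum (hand board : List Int) (c a b : Int) :
    value_pos_sub hand board c a b
      = ((PySem.List.pyRange a b 1).map (pvTerm hand board c)).sum := by
  unfold value_pos_sub
  rw [PySem.List.foldl_congr_mem (PySem.List.pyRange a b 1) _
      (fun v j => v + pvTerm hand board c j) 0 ?_, PySem.List.foldl_add, zero_add]
  intro acc x _
  simp only [pvTerm, bne]
  cases hb : (PySem.List.pyGetD board ((c - 1) * 13 + x) 0 == 0) <;>
    cases hc : hand.contains ((c - 1) * 13 + x + 1) <;>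
      simp <;> ring

-- B's single running-accumulator pass computes both the partial sum and A's
-- triangular double sum.
theorem run_pair (t : Int → Int) (r : Int) (d : Nat) :
    (PySem.List.pyRange (r + 1) (r + 1 + (d : Int)) 1).foldl
        (fun (s : Int × Int) i => (s.1 + t (i - 1), s.2 + (s.1 + t (i - 1)))) (0, 0)
      = (((PySem.List.pyRange r (r + (d : Int)) 1).map t).sum,
         ((PySem.List.pyRange r (r + 1 + (d : Int)) 1).map
            (fun i => ((PySem.List.pyRange r i 1).map t).sum)).sum) := by
  induction d with
  | zero =>
      simp only [Nat.cast_zero, add_zero]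
      rw [PySem.List.pyRange_one_eq_nil (le_refl (r + 1)),
          PySem.List.pyRange_one_eq_nil (le_refl r),
          PySem.List.pyRange_one_singleton]
      simp [PySem.List.pyRange_one_eq_nil (le_refl r)]
  | succ d ih =>
      have h1 : r + 1 + ((d + 1 : Nat) : Int) = (r + 1 + (d : Int)) + 1 := by push_cast; ring
      have h2 : r + ((d + 1 : Nat) : Int) = (r + (d : Int)) + 1 := by push_cast; ring
      rw [h1, h2,
          PySem.List.pyRange_one_succ_right (by omega : r + 1 ≤ r + 1 + (d : Int)),
          PySem.List.pyRange_one_succ_right (by omega : r ≤ r + (d : Int)),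
          PySem.List.pyRange_one_succ_right (by omega : r ≤ r + 1 + (d : Int)),
          List.foldl_append, ih]
      simp only [List.foldl, List.map_append, List.sum_append, List.map_cons,
        List.map_nil, List.sum_cons, List.sum_nil, Prod.mk.injEq]
      have h3 : r + 1 + (d : Int) - 1 = r + (d : Int) := by ring
      refine ⟨by rw [h3]; ring, ?_⟩
      rw [h3, show r + 1 + (d : Int) = (r + (d : Int)) + 1 from by ring,
          PySem.List.pyRange_one_succ_right (by omega : r ≤ r + (d : Int))]
      simp only [List.map_append, List.sum_append, List.map_cons, List.map_nil,
        List.sum_cons, List.sum_nil]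
      ring

-- A's membership test on the (color, rank) pair list agrees with B's membership
-- test on the set of same-color ranks.
theorem contains_eq (hand : List Int) (c0 i : Int) :
    (hand.map (fun h => (PySem.Int.truncdiv (h - 13) 13, PySem.Int.mod (h - 1) 13 + 1))).contains (c0, i)
      = PySem.Set.contains (PySem.Set.ofList
          ((hand.filter (fun h => PySem.Int.truncdiv (h - 13) 13 == c0)).map
            (fun h => PySem.Int.mod (h - 1) 13 + 1))) i := by
  rw [Bool.eq_iff_iff]
  simp only [List.contains_iff_mem, PySem.Set.contains, PySem.Set.mem_ofList,
    List.mem_map, List.mem_filter, beq_iff_eq, Prod.ext_iff]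
  constructor
  · rintro ⟨h, hh, e1, e2⟩
    exact ⟨h, ⟨hh, e1⟩, e2⟩
  · rintro ⟨h, ⟨hh, e1⟩, e2⟩
    exact ⟨h, hh, e1, e2⟩

-- A's whole ace branch (rank 1, aces 0) equals B's single reverse running pass
-- times the count of colors different from c0.
theorem ace_eq (hand board : List Int) (c0 : Int) :
    (PySem.List.pyRange 1 5 1).foldl (fun res i =>
      if c0 ≠ i then
        (PySem.List.pyRange 7 14 1).foldl (fun res j => res + value_pos_sub hand board c0 j 14)
          ((PySem.List.pyRange 1 8 1).foldl (fun res j => res - value_neg_sub hand board c0 1 j) res)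
      else res) 0
    = ((PySem.List.pyRange 13 6 (-1)).foldl
        (fun (s : Int × Int) j => (s.1 + pvTerm hand board c0 j, s.2 + (s.1 + pvTerm hand board c0 j)))
        (0, 0)).2
      * (((PySem.List.pyRange 1 5 1).filter (fun i => decide (c0 ≠ i))).length : Int) := by
  have hneg : ∀ res : Int,
      (PySem.List.pyRange 1 8 1).foldl (fun res j => res - value_neg_sub hand board c0 1 j) res = res := by
    intro res
    rw [PySem.List.foldl_congr_mem (PySem.List.pyRange 1 8 1) _ (fun res j => res) res ?_,
        PySem.List.foldl_ignore]
    intro acc x hx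
    rw [PySem.List.mem_pyRange_one] at hx
    unfold value_neg_sub
    rw [pos_sub_sum, PySem.List.pyRange_one_eq_nil (by omega : (1 : Int) ≤ x)]
    simp
  have hpos : ∀ res : Int,
      (PySem.List.pyRange 7 14 1).foldl (fun res j => res + value_pos_sub hand board c0 j 14) res
        = res + ((PySem.List.pyRange 7 14 1).map
            (fun j => ((PySem.List.pyRange j 14 1).map (pvTerm hand board c0)).sum)).sum := by
    intro res
    rw [PySem.List.foldl_congr_mem (PySem.List.pyRange 7 14 1) _
        (fun res j => res + ((PySem.List.pyRange j 14 1).map (pvTerm hand board c0)).sum) res ?_,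
        PySem.List.foldl_add]
    intro acc x _
    rw [pos_sub_sum]
  rw [PySem.List.foldl_congr_mem (PySem.List.pyRange 1 5 1) _
      (fun res i => if c0 ≠ i then
          res + ((PySem.List.pyRange 7 14 1).map
            (fun j => ((PySem.List.pyRange j 14 1).map (pvTerm hand board c0)).sum)).sum
        else res) 0 ?_]
  · have e1 : PySem.List.pyRange 1 5 1 = [1, 2, 3, 4] := by decide
    have e2 : PySem.List.pyRange 13 6 (-1) = [13, 12, 11, 10, 9, 8, 7] := by decide
    have e7 : PySem.List.pyRange 7 14 1 = [7, 8, 9, 10, 11, 12, 13] := by decide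
    have e8 : PySem.List.pyRange 8 14 1 = [8, 9, 10, 11, 12, 13] := by decide
    have e9 : PySem.List.pyRange 9 14 1 = [9, 10, 11, 12, 13] := by decide
    have e10 : PySem.List.pyRange 10 14 1 = [10, 11, 12, 13] := by decide
    have e11 : PySem.List.pyRange 11 14 1 = [11, 12, 13] := by decide
    have e12 : PySem.List.pyRange 12 14 1 = [12, 13] := by decide
    have e13 : PySem.List.pyRange 13 14 1 = [13] := by decide
    rw [e1, e2, e7]
    simp only [List.map_cons, List.map_nil]
    rw [e7, e8, e9, e10, e11, e12, e13]
    simp only [List.foldl, List.map_cons, List.map_nil, List.sum_cons, List.sum_nil,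
      List.filter]
    by_cases c1 : c0 = 1 <;> by_cases c2 : c0 = 2 <;> by_cases c3 : c0 = 3 <;>
      by_cases c4 : c0 = 4 <;> first
      | (exfalso; omega)
      | (norm_num [c1, c2, c3, c4]; ring)
  · intro acc x _
    dsimp only
    by_cases hc : c0 ≠ x
    · rw [if_pos hc, if_pos hc, hneg, hpos]
    · rw [if_neg hc, if_neg hc]

theorem ports_agree (hand board : List Int) (aces card potaces : Int) :
    value_card hand board aces card potaces = value_card_alt hand board aces card potaces := by
  have hr0 : 0 ≤ PySem.Int.mod (card - 1) 13 := PySem.Int.mod_nonneg _ (by norm_num)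
  have hr13 : PySem.Int.mod (card - 1) 13 < 13 := PySem.Int.mod_lt _ (by norm_num)
  simp only [value_card, value_card_alt]
  rw [PySem.List.foldl_append_singleton_eq_map, List.nil_append]
  simp only [PySem.List.foldl_append_if_eq_filter, List.nil_append, contains_eq]
  set c0 := PySem.Int.truncdiv (card - 13) 13 with hc0
  set R := PySem.Int.mod (card - 1) 13 with hRdef
  by_cases h7 : (7 : Int) ≤ R + 1
  · rw [if_pos (Or.inl h7), if_pos h7,
        if_neg (by rintro (⟨a, b⟩ | ⟨a, _⟩) <;> omega :
          ¬((R + 1 < 7 ∧ R + 1 > 1) ∨ (R + 1 = 0 ∧ aces ≠ 2 ∧ potaces = 1))),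
        if_neg (by rintro ⟨a, _⟩; omega : ¬(R + 1 = 1 ∧ aces = 0))]
    by_cases hemp : (PySem.List.pyRange (R + 1 + 1) 14 1).filter
        (PySem.Set.ofList ((hand.filter (fun h => PySem.Int.truncdiv (h - 13) 13 == c0)).map
          (fun h => PySem.Int.mod (h - 1) 13 + 1))).contains = []
    · rw [if_pos hemp, if_pos hemp]
    · rw [if_neg hemp, if_neg hemp]
      obtain ⟨m, hm⟩ : ∃ m, PySem.List.max? ((PySem.List.pyRange (R + 1 + 1) 14 1).filter
          (PySem.Set.ofList ((hand.filter (fun h => PySem.Int.truncdiv (h - 13) 13 == c0)).map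
            (fun h => PySem.Int.mod (h - 1) 13 + 1))).contains) (fun x => x) = some m := by
        rcases h : PySem.List.max? ((PySem.List.pyRange (R + 1 + 1) 14 1).filter
            (PySem.Set.ofList ((hand.filter (fun h => PySem.Int.truncdiv (h - 13) 13 == c0)).map
              (fun h => PySem.Int.mod (h - 1) 13 + 1))).contains) (fun x => x) with _ | m
        · exact absurd ((PySem.List.max?_eq_none_iff _ _).mp h) hemp
        · exact ⟨m, rfl⟩
      have hmem := PySem.List.max?_mem hm
      have hmr : R + 1 + 1 ≤ m := by
        have := (List.mem_filter.mp hmem).1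
        rw [PySem.List.mem_pyRange_one] at this
        omega
      rw [hm]
      simp only [Option.getD_some]
      rw [PySem.List.foldl_congr_mem (PySem.List.pyRange (R + 1) (m + 1) 1) _
          (fun v i => v + ((PySem.List.pyRange (R + 1) i 1).map (pvTerm hand board c0)).sum) 0
          (by intro acc x _; rw [pos_sub_sum]),
          PySem.List.foldl_add, zero_add]
      rw [show m + 1 = (R + 1) + 1 + ((m - (R + 1)).toNat : Int) from by omega,
          run_pair (pvTerm hand board c0) (R + 1) ((m - (R + 1)).toNat)]
  · rw [if_neg (by rintro (a | ⟨a, _⟩) <;> omega :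
        ¬(R + 1 ≥ 7 ∨ (R + 1 = 0 ∧ aces ≠ 1 ∧ potaces = 2))), if_neg h7]
    by_cases h2 : (1 : Int) < R + 1
    · rw [if_pos (Or.inl ⟨by omega, h2⟩), if_pos h2,
          if_neg (by rintro ⟨a, _⟩; omega : ¬(R + 1 = 1 ∧ aces = 0))]
      dsimp only
      simp only [List.nil_append]
      by_cases hemp : (PySem.List.pyRange 1 (R + 1) 1).filter
          (PySem.Set.ofList ((hand.filter (fun h => PySem.Int.truncdiv (h - 13) 13 == c0)).map
            (fun h => PySem.Int.mod (h - 1) 13 + 1))).contains = []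
      · rw [if_pos hemp,
            if_neg (by
              intro hcontra
              rcases List.any_eq_true.mp hcontra with ⟨x, hx, hpx⟩
              exact List.filter_eq_nil_iff.mp hemp x hx hpx)]
      · have hanyT : (PySem.List.pyRange 1 (R + 1) 1).any
            (fun i => PySem.Set.contains (PySem.Set.ofList
              ((hand.filter (fun h => PySem.Int.truncdiv (h - 13) 13 == c0)).map
                (fun h => PySem.Int.mod (h - 1) 13 + 1))) i) = true := by
          rcases List.ne_nil_iff_exists_cons.mp hemp with ⟨a, l, hl⟩
          have ha : a ∈ (PySem.List.pyRange 1 (R + 1) 1).filter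
              (PySem.Set.ofList ((hand.filter (fun h => PySem.Int.truncdiv (h - 13) 13 == c0)).map
                (fun h => PySem.Int.mod (h - 1) 13 + 1))).contains := by
            rw [hl]; exact List.mem_cons_self
          rcases List.mem_filter.mp ha with ⟨hmem, hpa⟩
          exact List.any_eq_true.mpr ⟨a, hmem, hpa⟩
        rw [if_neg hemp, if_pos hanyT]
        obtain ⟨m, hm⟩ : ∃ m, PySem.List.min? ((PySem.List.pyRange 1 (R + 1) 1).filter
            (PySem.Set.ofList ((hand.filter (fun h => PySem.Int.truncdiv (h - 13) 13 == c0)).map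
              (fun h => PySem.Int.mod (h - 1) 13 + 1))).contains) (fun x => x) = some m := by
          rcases h : PySem.List.min? ((PySem.List.pyRange 1 (R + 1) 1).filter
              (PySem.Set.ofList ((hand.filter (fun h => PySem.Int.truncdiv (h - 13) 13 == c0)).map
                (fun h => PySem.Int.mod (h - 1) 13 + 1))).contains) (fun x => x) with _ | m
          · exact absurd ((PySem.List.min?_eq_none_iff _ _).mp h) hemp
          · exact ⟨m, rfl⟩
        have hmem := PySem.List.min?_mem hm
        have hmr : m < R + 1 := by
          have := (List.mem_filter.mp hmem).1
          rw [PySem.List.mem_pyRange_one] at this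
          omega
        rw [hm]
        simp only [Option.getD_some]
        rw [PySem.List.pyRange_one_eq_nil (by omega : m ≤ R + 1)]
        rfl
    · rw [if_neg (by rintro (⟨a, b⟩ | ⟨a, _⟩) <;> omega :
          ¬((R + 1 < 7 ∧ R + 1 > 1) ∨ (R + 1 = 0 ∧ aces ≠ 2 ∧ potaces = 1))),
          if_neg (by omega : ¬(1 : Int) < R + 1)]
      by_cases ha : aces = 0
      · rw [if_pos ⟨by omega, ha⟩, if_pos ha]
        dsimp only
        rw [ace_eq hand board c0]
        split_ifs with hp1 hp2 hp2 <;> omega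
      · rw [if_neg (by rintro ⟨_, b⟩; exact ha b), if_neg ha]

-- ===== VERDICT (by name: the statement is the Claim_ definition above) =====
theorem value_card_spec : Claim_equal_value_card := by
  intro hand board aces card potaces _ _
  unfold Spec_value_card
  exact ports_agree hand board aces card potaces
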